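-- pv_equiv track=rewrite | github.com/swha0105/code_practice | heap.py | solution
-- ===== SOURCE A (Python) =====
-- def solution(scoville, K):
--     import heapq
--
--     answer = 0
--     heapq.heapify(scoville)
--
--     while len(scoville) >= 2:
--         min_1 = heapq.heappop(scoville)
--
--         if min_1 >= K:
--             return answer
--         else:
--             min_2 = heapq.heappop(scoville)
--             heapq.heappush(scoville,min_1 + 2*min_2)
--             answer += 1
--
--     if scoville[0] < K:
--         answer = -1
--
--     return answer
-- ===== SOURCE B (Python) =====
-- def solution(scoville, K):
--     s = sorted(scoville)
--     answer = 0
--     while len(s) >= 2 and s[0] < K: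
--         combined = s[0] + 2 * s[1]
--         del s[:2]
--         i = 0
--         while i < len(s) and s[i] <= combined:
--             i += 1
--         s.insert(i, combined)
--         answer += 1
--     return answer if s[0] >= K else -1
-- ===== Notes on version B (the rewrite author's own statement) =====
-- stated objective: alternative
-- what changed: Replaces the binary heap with a list sorted once up front: the two smallest values are read off the front and the combined value is re-inserted at its sorted position by a linear scan.
-- outside the precondition, e.g. on solution([], 1): A raises IndexError, B raises IndexError
import Mathlib
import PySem

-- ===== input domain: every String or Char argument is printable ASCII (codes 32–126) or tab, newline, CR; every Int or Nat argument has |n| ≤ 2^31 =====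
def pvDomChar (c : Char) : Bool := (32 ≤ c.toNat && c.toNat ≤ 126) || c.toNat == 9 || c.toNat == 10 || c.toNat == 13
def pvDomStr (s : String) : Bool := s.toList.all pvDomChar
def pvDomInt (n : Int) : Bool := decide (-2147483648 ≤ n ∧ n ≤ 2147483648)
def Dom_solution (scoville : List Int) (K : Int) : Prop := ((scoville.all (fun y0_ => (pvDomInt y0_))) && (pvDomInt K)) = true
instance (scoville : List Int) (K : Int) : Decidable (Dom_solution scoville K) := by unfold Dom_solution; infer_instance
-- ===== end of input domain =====

-- B replaces A's binary heap with a list sorted once, reading the two smallest off the front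
-- and re-inserting the combined value at its sorted position (objective: alternative).
-- A mutates its list argument in place (heapify/pops); the equivalence proved here is about the RETURN value only.

-- ===== PORT A =====
-- heapq is a library call; it is modeled by its documented extract-min semantics:
-- heappop returns the minimum of the heap and removes one occurrence of it.  This is exact
-- for the RETURN value of `solution`: the elements are Ints and every value A computes
-- depends only on the multiset of heap elements, never on the heap's internal array layout.
-- A's while loop becomes recursion on the heap; each iteration shrinks the heap by one.
def solution (scoville : List Int) (K : Int) : Int :=
  solutionLoopA scoville K 0
where
  solutionLoopA (heap : List Int) (K answer : Int) : Int :=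
    if h : 2 ≤ heap.length then
      -- min_1 = heapq.heappop(scoville)
      let m1 := (PySem.List.min? heap (fun x => x)).getD 0
      if m1 ≥ K then answer
      else
        -- min_2 = heapq.heappop(scoville); heapq.heappush(scoville, min_1 + 2*min_2)
        let rest := heap.erase m1
        let m2 := (PySem.List.min? rest (fun x => x)).getD 0
        solutionLoopA (rest.erase m2 ++ [m1 + 2 * m2]) K (answer + 1)
    else
      -- if scoville[0] < K: answer = -1   (heap has exactly one element here on Pre_)
      if heap.headD 0 < K then -1 else answer
  termination_by heap.length
  decreasing_by
    have h1 : heap ≠ [] := by intro hc; subst hc; simp at h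
    obtain ⟨a, ha⟩ : ∃ a, PySem.List.min? heap (fun x => x) = some a := by
      cases hm : PySem.List.min? heap (fun x => x) with
      | none => exact absurd ((PySem.List.min?_eq_none_iff _ _).mp hm) h1
      | some a => exact ⟨a, rfl⟩
    have hmem : (PySem.List.min? heap (fun x => x)).getD 0 ∈ heap := by
      rw [ha]; exact PySem.List.min?_mem ha
    have hlr : (heap.erase ((PySem.List.min? heap (fun x => x)).getD 0)).length = heap.length - 1 :=
      List.length_erase_of_mem hmem
    have h2 : heap.erase ((PySem.List.min? heap (fun x => x)).getD 0) ≠ [] := by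
      intro hc; rw [hc] at hlr; simp at hlr; omega
    obtain ⟨b, hb⟩ : ∃ b, PySem.List.min? (heap.erase ((PySem.List.min? heap (fun x => x)).getD 0)) (fun x => x) = some b := by
      cases hm : PySem.List.min? (heap.erase ((PySem.List.min? heap (fun x => x)).getD 0)) (fun x => x) with
      | none => exact absurd ((PySem.List.min?_eq_none_iff _ _).mp hm) h2
      | some b => exact ⟨b, rfl⟩
    have hmem2 : (PySem.List.min? (heap.erase ((PySem.List.min? heap (fun x => x)).getD 0)) (fun x => x)).getD 0 ∈ heap.erase ((PySem.List.min? heap (fun x => x)).getD 0) := by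
      rw [hb]; exact PySem.List.min?_mem hb
    have hlr2 := List.length_erase_of_mem hmem2
    simp only [List.length_append, List.length_cons, List.length_nil, hlr2, hlr]
    omega

-- ===== PORT B =====
-- the inner `while i < len(s) and s[i] <= combined: i += 1; s.insert(i, combined)` scan,
-- ported as structural recursion: walk past elements ≤ x, insert before the first one > x.
def insortB (x : Int) (s : List Int) : List Int :=
  match s with
  | [] => [x]
  | y :: ys => if x < y then x :: y :: ys else y :: insortB x ys

theorem insortB_length (x : Int) (s : List Int) : (insortB x s).length = s.length + 1 := by
  induction s with
  | nil => rfl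
  | cons y ys ih => simp only [insortB]; split <;> simp [ih]

-- the outer while loop: returns (answer, final s)
def solutionLoopB (s : List Int) (K answer : Int) : Int × List Int :=
  match s with
  | a :: b :: rest =>
      if a < K then solutionLoopB (insortB (a + 2 * b) rest) K (answer + 1)
      else (answer, a :: b :: rest)
  | _ => (answer, s)
termination_by s.length
decreasing_by simp [insortB_length]

def solution_alt (scoville : List Int) (K : Int) : Int :=
  let s := PySem.List.sorted scoville (fun x => x) false
  let r := solutionLoopB s K 0
  if r.2.headD 0 ≥ K then r.1 else -1

-- ===== PRECONDITION & SPEC =====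
-- Pre_ excludes only the empty list, on which A raises IndexError (scoville[0]).
def Pre_solution (scoville : List Int) (K : Int) : Prop := scoville ≠ []
instance (scoville : List Int) (K : Int) : Decidable (Pre_solution scoville K) := by unfold Pre_solution; infer_instance
def pvWitness_solution : List Int × Int := ([1, 2, 9, 3], 10)

def Spec_solution (scoville : List Int) (K : Int) (out : Int) : Prop := out = solution_alt scoville K
instance (scoville : List Int) (K : Int) (out : Int) : Decidable (Spec_solution scoville K out) := by unfold Spec_solution; infer_instance

-- ===== CLAIM (what is proved, stated in full; the proofs are below) =====
def Claim_equal_solution : Prop := ∀ (scoville : List Int) (K : Int), Dom_solution scoville K → Pre_solution scoville K → Spec_solution scoville K (solution scoville K)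

-- ===== LEMMAS AND PROOFS =====

theorem insortB_perm (x : Int) (s : List Int) : (insortB x s).Perm (x :: s) := by
  induction s with
  | nil => simp [insortB]
  | cons y ys ih =>
    simp only [insortB]; split
    · exact List.Perm.refl _
    · exact (List.Perm.cons y ih).trans (List.Perm.swap x y ys)

theorem insortB_pairwise (x : Int) (s : List Int) (hs : s.Pairwise (· ≤ ·)) :
    (insortB x s).Pairwise (· ≤ ·) := by
  induction s with
  | nil => simp [insortB]
  | cons y ys ih =>
    rcases List.pairwise_cons.mp hs with ⟨hy, hys⟩
    simp only [insortB]; split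
    · rename_i hlt
      refine List.pairwise_cons.mpr ⟨?_, hs⟩
      intro z hz
      rcases List.mem_cons.mp hz with rfl | hz
      · exact le_of_lt hlt
      · exact (le_of_lt hlt).trans (hy z hz)
    · rename_i hnlt
      refine List.pairwise_cons.mpr ⟨?_, ih hys⟩
      intro z hz
      rcases List.mem_cons.mp ((insortB_perm x ys).mem_iff.mp hz) with rfl | hz2
      · exact le_of_not_gt hnlt
      · exact hy z hz2

theorem min?_eq_of_min {l : List Int} {a : Int} (ha : a ∈ l) (hmin : ∀ y ∈ l, a ≤ y) :
    PySem.List.min? l (fun x => x) = some a := by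
  cases hm : PySem.List.min? l (fun x => x) with
  | none =>
    exact absurd ((PySem.List.min?_eq_none_iff _ _).mp hm) (List.ne_nil_of_mem ha)
  | some m =>
    have hmem : m ∈ l := PySem.List.min?_mem hm
    have h1 : m ≤ a := PySem.List.min?_isMin hm a ha
    have h2 : a ≤ m := hmin m hmem
    rw [le_antisymm h1 h2]

-- main loop lemma: A's heap loop on l equals B's sorted loop (plus its final check)
-- on any sorted rearrangement t of l.
theorem loop_eq (n : Nat) (l t : List Int) (K ans : Int)
    (hn : l.length ≤ n) (hne : l ≠ []) (hp : l.Perm t) (hs : t.Pairwise (· ≤ ·)) :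
    solution.solutionLoopA l K ans =
      (if (solutionLoopB t K ans).2.headD 0 ≥ K then (solutionLoopB t K ans).1 else -1) := by
  induction n generalizing l t ans with
  | zero =>
    exact absurd (List.length_eq_zero_iff.mp (Nat.le_zero.mp hn)) hne
  | succ n ih =>
    match t, hs with
    | [], _ => exact absurd (List.Perm.eq_nil hp) hne
    | [a], _ =>
      have hl : l.length = 1 := by simpa using hp.length_eq
      obtain ⟨x, hx⟩ := List.length_eq_one_iff.mp hl
      have hxa : x = a := by
        have h2 := hp; rw [hx] at h2
        simpa using h2.mem_iff.mp (by simp)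
      subst hxa
      rw [solution.solutionLoopA, dif_neg (by omega)]
      simp only [solutionLoopB, hx, List.headD_cons]
      by_cases hK : x < K
      · rw [if_pos hK, if_neg (by omega)]
      · rw [if_neg hK, if_pos (by omega)]
    | a :: b :: rest, hs =>
      have hlen : 2 ≤ l.length := by
        have := hp.length_eq; simp at this; omega
      have hamem : a ∈ l := hp.symm.subset (by simp)
      have hamin : ∀ y ∈ l, a ≤ y := by
        intro y hy
        rcases List.mem_cons.mp (hp.subset hy) with rfl | hy'
        · exact le_refl y
        · exact List.rel_of_pairwise_cons hs hy'
      have hminA : PySem.List.min? l (fun x => x) = some a := min?_eq_of_min hamem hamin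
      rw [solution.solutionLoopA, dif_pos hlen]
      simp only [hminA, Option.getD_some]
      by_cases hK : a < K
      · rw [if_neg (by omega)]
        -- second pop: the erased list is a permutation of b :: rest
        have hperm1 : (l.erase a).Perm (b :: rest) := by
          have := hp.erase a
          simpa [List.erase_cons_head] using this
        have hs' : (b :: rest).Pairwise (· ≤ ·) := List.pairwise_cons.mp hs |>.2
        have hbmem : b ∈ l.erase a := hperm1.symm.subset (by simp)
        have hbmin : ∀ y ∈ l.erase a, b ≤ y := by
          intro y hy
          rcases List.mem_cons.mp (hperm1.subset hy) with rfl | hy'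
          · exact le_refl y
          · exact List.rel_of_pairwise_cons hs' hy'
        have hminB : PySem.List.min? (l.erase a) (fun x => x) = some b := min?_eq_of_min hbmem hbmin
        simp only [hminB, Option.getD_some]
        -- recurse
        have hperm2 : ((l.erase a).erase b).Perm rest := by
          have h2 := hperm1.erase b
          simpa [List.erase_cons_head] using h2
        have hpermN : (((l.erase a).erase b) ++ [a + 2 * b]).Perm (insortB (a + 2 * b) rest) :=
          ((List.perm_append_singleton _ _).trans (hperm2.cons _)).trans (insortB_perm _ _).symm
        have hlenN : (((l.erase a).erase b) ++ [a + 2 * b]).length ≤ n := by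
          have e1 : (l.erase a).length = l.length - 1 := List.length_erase_of_mem hamem
          have e2 : ((l.erase a).erase b).length = (l.erase a).length - 1 := List.length_erase_of_mem hbmem
          simp only [List.length_append, List.length_cons, List.length_nil, e2, e1]
          omega
        have hneN : ((l.erase a).erase b) ++ [a + 2 * b] ≠ [] := by simp
        simp only [solutionLoopB, if_pos hK]
        exact ih _ _ _ hlenN hneN hpermN (insortB_pairwise _ _ (List.pairwise_cons.mp hs').2)
      · rw [if_pos (by omega)]
        simp only [solutionLoopB, if_neg hK, List.headD_cons]
        rw [if_pos (by omega)]

-- ===== VERDICT (by name: the statement is the Claim_ definition above) =====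
theorem solution_spec : Claim_equal_solution := by
  intro scoville K _ hpre
  unfold Spec_solution solution_alt solution
  have hperm := (PySem.List.sorted_perm scoville (fun x => x) false).symm
  have hpw : (PySem.List.sorted scoville (fun x => x) false).Pairwise (· ≤ ·) := by
    simpa using PySem.List.sorted_pairwise scoville (fun x => x)
  simpa using loop_eq scoville.length scoville _ K 0 le_rfl hpre hperm hpw
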